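-- pv_equiv track=rewrite | github.com/AshleySetter/AdventOfCode2017 | day3/python/part1.py | gen_instructions
-- ===== SOURCE A (Python) =====
-- def to_0123(n):
--     nr = n
--     while nr > 3:
--         nr -= 4
--     return nr
--
-- def gen_instructions(grid):
--     n = len(grid)
--     move_order = 'rdlu'
--     mult = 0
--     moves = ""
--     i = 0
--     while len(moves) <= n**2:
--         if i % 2 == 0:
--             mult += 1
--         movement = move_order[to_0123(i)]
--         moves += mult*movement
--         i += 1
--     moves = moves[0:n**2-1]
--     return moves
-- ===== SOURCE B (Python) =====
-- def gen_instructions(grid):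
--     n = len(grid)
--     total = n * n - 1          # number of moves needed; range() is empty when total <= 0
--     d = 0                      # index into 'rdlu'
--     runlen = 1                 # length of the current run
--     remaining = 1              # chars left in the current run
--     changes = 0                # direction changes so far
--     out = []
--     for _ in range(total):
--         out.append('rdlu'[d])
--         remaining -= 1
--         if remaining == 0:
--             d = (d + 1) % 4
--             changes += 1
--             if changes % 2 == 0:
--                 runlen += 1
--             remaining = runlen
--     return ''.join(out)
-- ===== Notes on version B (the rewrite author's own statement) =====
-- stated objective: alternative
-- what changed: B computes the exact target length n*n-1 up front and emits the spiral one character at a time with a direction index and run-length counters, instead of A's run-by-run string concatenation that overshoots past n**2 chars and then truncates with a slice (and recomputes i mod 4 by repeated subtraction each iteration).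
import Mathlib
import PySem

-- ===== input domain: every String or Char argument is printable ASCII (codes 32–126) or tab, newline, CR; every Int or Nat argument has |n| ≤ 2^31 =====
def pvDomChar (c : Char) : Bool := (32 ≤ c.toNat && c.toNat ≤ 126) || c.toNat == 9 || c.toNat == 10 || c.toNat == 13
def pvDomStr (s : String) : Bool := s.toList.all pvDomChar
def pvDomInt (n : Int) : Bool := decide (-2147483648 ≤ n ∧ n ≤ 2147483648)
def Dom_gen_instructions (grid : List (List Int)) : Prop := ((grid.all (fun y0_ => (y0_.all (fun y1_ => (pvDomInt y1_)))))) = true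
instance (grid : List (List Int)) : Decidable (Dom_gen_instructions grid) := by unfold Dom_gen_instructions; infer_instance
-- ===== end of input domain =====

-- B emits the spiral string char by char at its exact target length n*n-1 (direction index + run-length counters)
-- instead of A's run-by-run concatenation that overshoots past n**2 chars and slices; alternative decomposition.

-- ===== PORT A =====
def to_0123 (n : Int) : Int :=
  if n > 3 then to_0123 (n - 4) else n
termination_by n.toNat
decreasing_by omega

-- A's while loop with state (i, mult, moves); the lexicographic measure mirrors that the appended run
-- is nonempty except possibly once in a row.
def loopA (n i mult : Nat) (moves : List Char) : List Char :=
  if moves.length ≤ n ^ 2 then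
    let mult' := if i % 2 = 0 then mult + 1 else mult
    let movement := PySem.List.pyGetD ['r', 'd', 'l', 'u'] (to_0123 (i : Int)) ' '
    loopA n (i + 1) mult' (moves ++ List.replicate mult' movement)
  else
    moves
termination_by (n ^ 2 + 1 - moves.length, 1 - mult, i % 2)
decreasing_by
  simp only [List.length_append, List.length_replicate]
  split_ifs with h2
  · exact Prod.Lex.left _ _ (by omega)
  · by_cases hm : mult = 0
    · subst hm
      simp only [Nat.add_zero, Nat.sub_zero]
      apply Prod.Lex.right
      apply Prod.Lex.right
      omega
    · exact Prod.Lex.left _ _ (by omega)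

def gen_instructions (grid : List (List Int)) : String :=
  let n := grid.length
  let moves := loopA n 0 0 []
  String.ofList (PySem.List.slice moves (some 0) (some ((n : Int) ^ 2 - 1)))

-- ===== PORT B =====
-- Source B's for-loop over range(total): t counts the remaining iterations.
def loopB (t d runlen remaining changes : Nat) (out : List Char) : List Char :=
  match t with
  | 0 => out
  | t + 1 =>
    let out' := out ++ [PySem.List.pyGetD ['r', 'd', 'l', 'u'] (d : Int) ' ']
    let remaining' := remaining - 1
    if remaining' = 0 then
      let d' := (d + 1) % 4
      let changes' := changes + 1
      let runlen' := if changes' % 2 = 0 then runlen + 1 else runlen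
      loopB t d' runlen' runlen' changes' out'
    else
      loopB t d runlen remaining' changes out'

def gen_instructions_alt (grid : List (List Int)) : String :=
  let n := grid.length
  let total : Int := (n : Int) * n - 1
  String.ofList (loopB total.toNat 0 1 1 0 [])

-- ===== PRECONDITION & SPEC =====
def Spec_gen_instructions (grid : List (List Int)) (out : String) : Prop := out = gen_instructions_alt grid
instance (grid : List (List Int)) (out : String) : Decidable (Spec_gen_instructions grid out) := by unfold Spec_gen_instructions; infer_instance

-- ===== CLAIM (what is proved, stated in full; the proofs are below) =====
def Claim_equal_gen_instructions : Prop := ∀ (grid : List (List Int)), Dom_gen_instructions grid → Spec_gen_instructions grid (gen_instructions grid)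

-- ===== LEMMAS AND PROOFS =====

-- run i of the spiral has length runLen i, all copies of dirChar i
def runLen (i : Nat) : Nat := i / 2 + 1
def dirChar (i : Nat) : Char :=
  if i % 4 = 0 then 'r' else if i % 4 = 1 then 'd' else if i % 4 = 2 then 'l' else 'u'

-- concatenation of cnt whole runs starting at run i  (A's loop produces runsFrom 0 j)
def runsFrom (i cnt : Nat) : List Char :=
  match cnt with
  | 0 => []
  | cnt + 1 => List.replicate (runLen i) (dirChar i) ++ runsFrom (i + 1) cnt

-- t chars of the spiral stream, standing inside run i with p of its chars still to emit
def streamFrom (i p t : Nat) : List Char :=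
  match t with
  | 0 => []
  | t + 1 => dirChar i :: (if p = 1 then streamFrom (i + 1) (runLen (i + 1)) t else streamFrom i (p - 1) t)

theorem streamFrom_succ (i p t : Nat) : streamFrom i p (t + 1) =
    dirChar i :: (if p = 1 then streamFrom (i + 1) (runLen (i + 1)) t else streamFrom i (p - 1) t) := rfl

theorem pyGetD_rdlu (i : Nat) :
    PySem.List.pyGetD ['r', 'd', 'l', 'u'] ((i % 4 : Nat) : Int) ' ' = dirChar i := by
  have h : i % 4 = 0 ∨ i % 4 = 1 ∨ i % 4 = 2 ∨ i % 4 = 3 := by omega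
  rcases h with h | h | h | h <;> simp [h, dirChar] <;> decide

theorem to_0123_natCast (i : Nat) : to_0123 (i : Int) = ((i % 4 : Nat) : Int) := by
  induction i using Nat.strong_induction_on with
  | _ i ih =>
    rw [to_0123]
    by_cases h : (i : Int) > 3
    · have h4 : 4 ≤ i := by omega
      rw [if_pos h, show ((i : Int) - 4) = ((i - 4 : Nat) : Int) from by omega,
        ih (i - 4) (by omega), show (i - 4) % 4 = i % 4 from by omega]
    · simp only [h, if_false]
      omega

theorem runLen_pos (i : Nat) : 1 ≤ runLen i := by unfold runLen; omega

theorem runLen_succ (i : Nat) :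
    runLen (i + 1) = if (i + 1) % 2 = 0 then runLen i + 1 else runLen i := by
  unfold runLen; split_ifs <;> omega

theorem runsFrom_snoc : ∀ (cnt i : Nat),
    runsFrom i (cnt + 1) = runsFrom i cnt ++ List.replicate (runLen (i + cnt)) (dirChar (i + cnt)) := by
  intro cnt
  induction cnt with
  | zero => intro i; simp [runsFrom]
  | succ c ih =>
    intro i
    rw [runsFrom]
    conv_rhs => rw [runsFrom]
    rw [ih (i + 1), List.append_assoc]
    ring_nf

theorem rep_stream : ∀ (p i t : Nat), 1 ≤ p → p ≤ runLen i →
    List.replicate p (dirChar i) ++ streamFrom (i + 1) (runLen (i + 1)) t = streamFrom i p (p + t) := by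
  intro p
  induction p with
  | zero => intro i t h1 _; omega
  | succ q ih =>
    intro i t h1 h2
    by_cases hq : q = 0
    · subst hq
      rw [show 1 + t = t + 1 from by omega, streamFrom_succ]
      simp
    · rw [show q + 1 + t = (q + t) + 1 from by omega, streamFrom_succ]
      have hcond : ¬(q + 1 = 1) := by omega
      simp only [hcond, if_false, Nat.add_sub_cancel]
      rw [← ih i t (by omega) (by omega)]
      simp [List.replicate_succ]

theorem runsFrom_eq_stream : ∀ (cnt i : Nat),
    runsFrom i cnt = streamFrom i (runLen i) ((runsFrom i cnt).length) := by
  intro cnt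
  induction cnt with
  | zero => intro i; simp [runsFrom, streamFrom]
  | succ c ih =>
    intro i
    rw [runsFrom]
    simp only [List.length_append, List.length_replicate]
    conv_lhs => rw [ih (i + 1)]
    exact rep_stream (runLen i) i _ (runLen_pos i) le_rfl

theorem stream_take : ∀ (t k i p : Nat), (streamFrom i p t).take k = streamFrom i p (min t k) := by
  intro t
  induction t with
  | zero => intro k i p; simp [streamFrom]
  | succ t ih =>
    intro k i p
    match k with
    | 0 => simp [streamFrom]
    | k + 1 =>
      rw [streamFrom_succ, show min (t + 1) (k + 1) = (min t k) + 1 from by omega, streamFrom_succ]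
      by_cases h : p = 1 <;> simp [h, ih]

theorem loopB_stream : ∀ (t i p : Nat) (out : List Char), 1 ≤ p → p ≤ runLen i →
    loopB t (i % 4) (runLen i) p i out = out ++ streamFrom i p t := by
  intro t
  induction t with
  | zero => intro i p out _ _; simp [loopB, streamFrom]
  | succ t ih =>
    intro i p out h1 h2
    rw [loopB]
    simp only [pyGetD_rdlu]
    by_cases hp : p = 1
    · subst hp
      simp only [Nat.sub_self]
      have hd : (i % 4 + 1) % 4 = (i + 1) % 4 := by omega
      have hr : (if (i + 1) % 2 = 0 then runLen i + 1 else runLen i) = runLen (i + 1) :=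
        (runLen_succ i).symm
      rw [hd, hr, ih (i + 1) (runLen (i + 1)) _ (runLen_pos _) le_rfl, streamFrom_succ]
      simp
    · have hc : ¬(p - 1 = 0) := by omega
      simp only [hc, if_false]
      rw [ih i (p - 1) _ (by omega) (by omega), streamFrom_succ]
      simp [hp]

theorem loopA_spec : ∀ (k n i : Nat), n ^ 2 + 1 - (runsFrom 0 i).length ≤ k →
    ∃ j, loopA n i ((i + 1) / 2) (runsFrom 0 i) = runsFrom 0 j ∧ n ^ 2 < (runsFrom 0 j).length := by
  intro k
  induction k with
  | zero =>
    intro n i h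
    rw [loopA]
    have hlen : ¬((runsFrom 0 i).length ≤ n ^ 2) := by omega
    simp only [hlen, if_false]
    exact ⟨i, rfl, by omega⟩
  | succ k ih =>
    intro n i h
    rw [loopA]
    by_cases hlen : (runsFrom 0 i).length ≤ n ^ 2
    · simp only [hlen, if_true]
      have hm : (if i % 2 = 0 then (i + 1) / 2 + 1 else (i + 1) / 2) = runLen i := by
        unfold runLen; split_ifs <;> omega
      have hmov : PySem.List.pyGetD ['r', 'd', 'l', 'u'] (to_0123 (i : Int)) ' ' = dirChar i := by
        rw [to_0123_natCast, pyGetD_rdlu]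
      have hrun : runsFrom 0 i ++ List.replicate (runLen i) (dirChar i) = runsFrom 0 (i + 1) := by
        rw [runsFrom_snoc i 0]; simp
      have hmult2 : runLen i = (i + 1 + 1) / 2 := by unfold runLen; omega
      rw [hm, hmov, hrun, hmult2]
      apply ih n (i + 1)
      have hgrow : (runsFrom 0 (i + 1)).length = (runsFrom 0 i).length + runLen i := by
        rw [← hrun]; simp
      have := runLen_pos i
      omega
    · simp only [hlen, if_false]
      exact ⟨i, rfl, by omega⟩

theorem main_pos (n : Nat) (h1 : 1 ≤ n) :
    String.ofList (PySem.List.slice (loopA n 0 0 []) (some 0) (some ((n : Int) ^ 2 - 1))) =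
    String.ofList (loopB ((n : Int) * n - 1).toNat 0 1 1 0 []) := by
  obtain ⟨j, hA, hlen⟩ := loopA_spec (n ^ 2 + 1) n 0 (by simp [runsFrom])
  have hA' : loopA n 0 0 [] = runsFrom 0 j := hA
  rw [hA']
  have hsq : 1 ≤ n ^ 2 := Nat.one_le_pow _ _ h1
  have hc : ((n : Int) ^ 2 - 1) = ((n ^ 2 - 1 : Nat) : Int) := by push_cast [hsq]; ring
  rw [hc, PySem.List.slice_zero_start, PySem.List.slice_to_natCast]
  have hstream := runsFrom_eq_stream j 0
  have hrl0 : runLen 0 = 1 := rfl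
  rw [hrl0] at hstream
  rw [hstream, stream_take]
  rw [show min ((runsFrom 0 j).length) (n ^ 2 - 1) = n ^ 2 - 1 from by omega]
  have ht : ((n : Int) * n - 1).toNat = n ^ 2 - 1 := by
    rw [show ((n : Int) * n) = ((n ^ 2 : Nat) : Int) from by push_cast; ring]
    omega
  rw [ht]
  have hB := loopB_stream (n ^ 2 - 1) 0 1 [] le_rfl (by simp [runLen])
  simp only [Nat.zero_mod, hrl0] at hB
  rw [hB]
  simp

theorem A_nil : gen_instructions [] = "" := by
  have h1 : loopA 0 0 0 [] = ['r'] := by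
    rw [loopA]
    norm_num
    rw [loopA]
    simp [to_0123, PySem.List.pyGetD]
  rw [gen_instructions]
  simp only [List.length_nil, h1]
  norm_num
  decide

-- ===== VERDICT (by name: the statement is the Claim_ definition above) =====
theorem gen_instructions_spec : Claim_equal_gen_instructions := by
  intro grid _
  unfold Spec_gen_instructions
  match grid with
  | [] =>
    rw [A_nil]
    rfl
  | g :: gs =>
    rw [gen_instructions, gen_instructions_alt]
    exact main_pos (g :: gs).length (by simp)
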